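-- pv_equiv track=rewrite | github.com/amirhosss/Python-Kheft-TelegramBot | kheft/bot/handlers/utils.py | normalize_from_en
-- ===== SOURCE A (Python) =====
-- def normalize_from_en(num: int):
--     persian_map = {
--         "0": "۰",
--         "1": "۱",
--         "2": "۲",
--         "3": "۳",
--         "4": "۴",
--         "5": "۵",
--         "6": "۶",
--         "7": "۷",
--         "8": "۸",
--         "9": "۹",
--     }
--     num = "{:,}".format(num).replace(",", "،")
--
--     return "".join(
--         [persian_map[digit] if digit in persian_map.keys() else digit for digit in num]
--     )
-- ===== SOURCE B (Python) =====
-- def normalize_from_en(num: int):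
--     persian = "۰۱۲۳۴۵۶۷۸۹"
--     s = str(abs(num))
--     groups = []
--     i = len(s)
--     while i > 0:
--         groups.append(s[max(0, i - 3):i])
--         i -= 3
--     body = "،".join(
--         "".join(persian[ord(c) - 48] for c in g) for g in reversed(groups)
--     )
--     return ("-" if num < 0 else "") + body
-- ===== Notes on version B (the rewrite author's own statement) =====
-- stated objective: alternative
-- what changed: B drops the '{:,}'.format + ',' replacement + per-char dict-lookup pipeline and instead splits the absolute value's digit string into groups of three from the right itself, maps each digit to Persian by index arithmetic (ord(c)-48) into a digit string, and joins the groups with the Persian comma, prepending the sign.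
import Mathlib
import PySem

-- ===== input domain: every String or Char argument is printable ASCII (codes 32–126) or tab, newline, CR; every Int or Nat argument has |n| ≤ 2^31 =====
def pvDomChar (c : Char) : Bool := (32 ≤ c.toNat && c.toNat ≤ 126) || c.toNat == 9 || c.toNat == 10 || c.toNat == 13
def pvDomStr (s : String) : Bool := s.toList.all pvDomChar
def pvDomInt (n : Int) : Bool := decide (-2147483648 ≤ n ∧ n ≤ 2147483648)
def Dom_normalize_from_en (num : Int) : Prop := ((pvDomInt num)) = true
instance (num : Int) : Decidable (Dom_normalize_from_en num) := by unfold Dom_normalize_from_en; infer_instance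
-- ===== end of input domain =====

-- B converts |num| to its digit string itself, groups it in threes from the right, maps digits to
-- Persian by index arithmetic and joins with '،', instead of A's format/replace/dict-lookup pipeline.

-- ===== PORT A =====
-- hand port of "{:,}".format(num) for an int (exact there: groups of three from the right, '-' not grouped)
def pvCommaRev : Nat → List Char → List Char
  | _, [] => []
  | k, c :: cs => if k == 3 then ',' :: c :: pvCommaRev 1 cs else c :: pvCommaRev (k + 1) cs

def pyFormatComma (num : Int) : String :=
  let s := PySem.Int.toChars num
  if s.head? = some '-' then String.ofList ('-' :: (pvCommaRev 0 s.tail.reverse).reverse)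
  else String.ofList ((pvCommaRev 0 s.reverse).reverse)

def normalize_from_en (num : Int) : String :=
  let persian_map : PySem.Dict String String := PySem.Dict.mk
    [("0", "۰"), ("1", "۱"), ("2", "۲"), ("3", "۳"), ("4", "۴"),
     ("5", "۵"), ("6", "۶"), ("7", "۷"), ("8", "۸"), ("9", "۹")]
  let numS := PySem.Str.replace (pyFormatComma num) "," "،"
  PySem.Str.join "" (numS.toList.map (fun digit =>
    match persian_map.get? (String.ofList [digit]) with
    | some p => p
    | none => String.ofList [digit]))

-- ===== PORT B =====
def pvPersian : List Char := ['۰', '۱', '۲', '۳', '۴', '۵', '۶', '۷', '۸', '۹']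

-- Python's persian[ord(c) - 48]: the index is always in range (c is a decimal digit); default never used
def pvMapDigit (c : Char) : Char := pvPersian.getD (c.toNat - 48) c

-- the while loop: groups of ≤ 3 chars taken from the right (input is the reversed digit list)
def pvChunkRev : List Char → List (List Char)
  | [] => []
  | c :: cs => ((c :: cs).take 3).reverse :: pvChunkRev ((c :: cs).drop 3)
  termination_by l => l.length
  decreasing_by simp

-- hand port of '،'.join(...)
def pvJoinSep (sep : List Char) : List (List Char) → List Char
  | [] => []
  | [g] => g
  | g :: gs => g ++ sep ++ pvJoinSep sep gs

def normalize_from_en_alt (num : Int) : String :=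
  let sign : List Char := if num < 0 then ['-'] else []
  let ds := (PySem.Int.toStr |num|).toList
  let groups := (pvChunkRev ds.reverse).reverse
  String.ofList (sign ++ pvJoinSep ['،'] (groups.map (fun g => g.map pvMapDigit)))

-- ===== PRECONDITION & SPEC =====
def Spec_normalize_from_en (num : Int) (out : String) : Prop := out = normalize_from_en_alt num
instance (num : Int) (out : String) : Decidable (Spec_normalize_from_en num out) := by unfold Spec_normalize_from_en; infer_instance

-- ===== CLAIM (what is proved, stated in full; the proofs are below) =====
def Claim_equal_normalize_from_en : Prop := ∀ (num : Int), Dom_normalize_from_en num → Spec_normalize_from_en num (normalize_from_en num)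

-- ===== LEMMAS AND PROOFS =====

-- A's per-character map, as a char function
def pvFA (c : Char) : Char :=
  if c = '0' then '۰' else if c = '1' then '۱' else if c = '2' then '۲' else
  if c = '3' then '۳' else if c = '4' then '۴' else if c = '5' then '۵' else
  if c = '6' then '۶' else if c = '7' then '۷' else if c = '8' then '۸' else
  if c = '9' then '۹' else c

def pvDigits : List Char := ['0', '1', '2', '3', '4', '5', '6', '7', '8', '9']

lemma pv_replace_go (o n : Char) : ∀ (fuel : Nat) (l acc : List Char), l.length ≤ fuel →
    PySem.Chars.replace.go [o] [n] fuel l acc =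
      acc.reverse ++ l.map (fun c => if c = o then n else c) := by
  intro fuel
  induction fuel with
  | zero =>
    intro l acc h
    have : l = [] := List.length_eq_zero_iff.mp (Nat.le_zero.mp h)
    subst this
    simp [PySem.Chars.replace.go]
  | succ f ih =>
    intro l acc h
    match l with
    | [] => simp [PySem.Chars.replace.go]
    | c :: t =>
      rcases eq_or_ne c o with hc | hc
      · have hpre : [o].isPrefixOf (c :: t) = true := by simp [List.isPrefixOf, hc]
        simp only [PySem.Chars.replace.go, hpre, if_true]
        rw [show List.drop [o].length (c :: t) = t from rfl,
          ih t ([n].reverse ++ acc) (by simpa using Nat.le_of_succ_le_succ h)]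
        simp [hc]
      · have hpre : [o].isPrefixOf (c :: t) = false := by
          simp [List.isPrefixOf]; exact fun h' => absurd h'.symm hc
        simp only [PySem.Chars.replace.go, hpre, Bool.false_eq_true, if_false]
        rw [ih t (c :: acc) (by simpa using Nat.le_of_succ_le_succ h)]
        simp [hc]

lemma pv_replace_single (cs : List Char) (o n : Char) :
    PySem.Chars.replace cs [o] [n] = cs.map (fun c => if c = o then n else c) := by
  rw [PySem.Chars.replace, if_neg (by simp)]
  exact pv_replace_go o n cs.length cs [] le_rfl

lemma pv_itemA (c : Char) :
    (match (PySem.Dict.mk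
    [("0", ("۰" : String)), ("1", "۱"), ("2", "۲"), ("3", "۳"), ("4", "۴"),
     ("5", "۵"), ("6", "۶"), ("7", "۷"), ("8", "۸"), ("9", "۹")]).get? (String.ofList [c]) with
    | some p => p
    | none => String.ofList [c]) = String.ofList [pvFA c] := by
  by_cases h0 : c = '0'; · subst h0; decide
  by_cases h1 : c = '1'; · subst h1; decide
  by_cases h2 : c = '2'; · subst h2; decide
  by_cases h3 : c = '3'; · subst h3; decide
  by_cases h4 : c = '4'; · subst h4; decide
  by_cases h5 : c = '5'; · subst h5; decide
  by_cases h6 : c = '6'; · subst h6; decide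
  by_cases h7 : c = '7'; · subst h7; decide
  by_cases h8 : c = '8'; · subst h8; decide
  by_cases h9 : c = '9'; · subst h9; decide
  have hnone : (PySem.Dict.mk
      [("0", ("۰" : String)), ("1", "۱"), ("2", "۲"), ("3", "۳"), ("4", "۴"),
       ("5", "۵"), ("6", "۶"), ("7", "۷"), ("8", "۸"), ("9", "۹")]).get?
      (String.ofList [c]) = none := by
    simp only [PySem.Dict.get?, Option.map_eq_none_iff]
    rw [List.find?_eq_none]
    intro p hp
    fin_cases hp <;>
      · simp only [beq_iff_eq]
        intro he
        have := congrArg String.toList he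
        simp at this
        subst this
        simp_all
  rw [hnone]
  simp [pvFA, h0, h1, h2, h3, h4, h5, h6, h7, h8, h9]

lemma pv_commaRev_step (a b c d : Char) (r : List Char) :
    pvCommaRev 0 (a :: b :: c :: d :: r) = a :: b :: c :: ',' :: pvCommaRev 0 (d :: r) := by
  simp [pvCommaRev]

lemma pv_chunkRev_ne_nil (l : List Char) (h : l ≠ []) : pvChunkRev l ≠ [] := by
  cases l with
  | nil => exact absurd rfl h
  | cons c cs => rw [pvChunkRev]; simp

lemma pv_joinSep_append (sep g : List Char) (gs : List (List Char)) (h : gs ≠ []) :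
    pvJoinSep sep (gs ++ [g]) = pvJoinSep sep gs ++ sep ++ g := by
  induction gs with
  | nil => exact absurd rfl h
  | cons x xs ih =>
    cases xs with
    | nil => simp [pvJoinSep]
    | cons y ys =>
      have ht := ih (by simp)
      simp only [List.cons_append] at ht ⊢
      simp [pvJoinSep, ht, List.append_assoc]

lemma pv_M0 (l : List Char) :
    (pvCommaRev 0 l).reverse = pvJoinSep [','] ((pvChunkRev l).reverse) := by
  have main : ∀ (n : Nat) (l : List Char), l.length ≤ n →
      (pvCommaRev 0 l).reverse = pvJoinSep [','] ((pvChunkRev l).reverse) := by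
    intro n
    induction n with
    | zero =>
      intro l h
      have : l = [] := List.length_eq_zero_iff.mp (Nat.le_zero.mp h)
      subst this; simp [pvCommaRev, pvChunkRev, pvJoinSep]
    | succ n ih =>
      intro l h
      match l with
      | [] => simp [pvCommaRev, pvChunkRev, pvJoinSep]
      | [a] => rw [pvChunkRev]; simp [pvCommaRev, pvChunkRev, pvJoinSep]
      | [a, b] => rw [pvChunkRev]; simp [pvCommaRev, pvChunkRev, pvJoinSep]
      | [a, b, c] => rw [pvChunkRev]; simp [pvCommaRev, pvChunkRev, pvJoinSep]
      | a :: b :: c :: d :: r =>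
        rw [pv_commaRev_step, pvChunkRev]
        have hlen : (d :: r).length ≤ n := by simp at h ⊢; omega
        have hne : (pvChunkRev (d :: r)).reverse ≠ [] := by
          simp; exact pv_chunkRev_ne_nil _ (by simp)
        simp only [List.take, List.drop, List.reverse_cons]
        rw [pv_joinSep_append _ _ _ hne, ← ih _ hlen]
        simp
  exact main l.length l le_rfl

lemma pv_joinSep_map (f : Char → Char) (sep : List Char) (gs : List (List Char)) :
    (pvJoinSep sep gs).map f = pvJoinSep (sep.map f) (gs.map (fun g => g.map f)) := by
  induction gs with
  | nil => rfl
  | cons g gs ih =>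
    cases gs with
    | nil => rfl
    | cons h hs => simp only [pvJoinSep, List.map_append, List.map_cons, ih]

lemma pv_chunk_mem (l : List Char) : ∀ (g : List Char), g ∈ pvChunkRev l → ∀ c ∈ g, c ∈ l := by
  induction l using pvChunkRev.induct with
  | case1 => intro g hg; simp [pvChunkRev] at hg
  | case2 x xs ih =>
    intro g hg c hc
    rw [pvChunkRev] at hg
    rcases List.mem_cons.mp hg with h | h
    · subst h
      exact List.mem_of_mem_take (List.mem_reverse.mp hc)
    · exact List.mem_of_mem_drop (ih g h c hc)

lemma pv_digitChar_mem (m : Nat) (h : m < 10) : Nat.digitChar m ∈ pvDigits := by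
  interval_cases m <;> decide

lemma pv_toDigitsCore_mem (f : Nat) : ∀ (n : Nat) (acc : List Char),
    (∀ c ∈ acc, c ∈ pvDigits) → ∀ c ∈ Nat.toDigitsCore 10 f n acc, c ∈ pvDigits := by
  induction f with
  | zero => intro n acc hacc c hc; exact hacc c (by simpa [Nat.toDigitsCore] using hc)
  | succ f ih =>
    intro n acc hacc c hc
    simp only [Nat.toDigitsCore] at hc
    by_cases hd : n / 10 = 0
    · rw [if_pos hd] at hc
      rcases List.mem_cons.mp hc with h | h
      · exact h ▸ pv_digitChar_mem _ (Nat.mod_lt _ (by norm_num))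
      · exact hacc c h
    · rw [if_neg hd] at hc
      refine ih (n / 10) _ ?_ c hc
      intro x hx
      rcases List.mem_cons.mp hx with h | h
      · exact h ▸ pv_digitChar_mem _ (Nat.mod_lt _ (by norm_num))
      · exact hacc x h

lemma pv_toDigits_mem (n : Nat) : ∀ c ∈ Nat.toDigits 10 n, c ∈ pvDigits :=
  pv_toDigitsCore_mem (n + 1) n [] (by simp)

lemma pv_agree (c : Char) (h : c ∈ pvDigits) : pvFA c = pvMapDigit c := by
  fin_cases h <;> decide

lemma pv_repl_digit (c : Char) (h : c ∈ pvDigits) : (if c = ',' then '،' else c) = c := by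
  fin_cases h <;> decide

-- core: A's comma string mapped charwise = B's groups joined, for an all-digit list
lemma pv_core (ds : List Char) (hd : ∀ c ∈ ds, c ∈ pvDigits) :
    ((pvCommaRev 0 ds.reverse).reverse.map (fun c => pvFA (if c = ',' then '،' else c))) =
      pvJoinSep ['،'] (((pvChunkRev ds.reverse).reverse).map (fun g => g.map pvMapDigit)) := by
  rw [pv_M0, pv_joinSep_map]
  have hsep : [','].map (fun c => pvFA (if c = ',' then '،' else c)) = ['،'] := by decide
  rw [hsep]
  congr 1
  apply List.map_congr_left
  intro g hg
  apply List.map_congr_left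
  intro c hc
  have hmem : c ∈ ds := by
    have := pv_chunk_mem ds.reverse g (List.mem_reverse.mp hg) c hc
    simpa using this
  have hdig := hd c hmem
  rw [pv_repl_digit c hdig]
  exact pv_agree c hdig

lemma pv_A_toList (num : Int) :
    (normalize_from_en num).toList =
      (pyFormatComma num).toList.map (fun c => pvFA (if c = ',' then '،' else c)) := by
  simp only [normalize_from_en]
  rw [PySem.Str.toList_join, List.map_map]
  have hitem : (String.toList ∘ fun digit => (match (PySem.Dict.mk
      [("0", ("۰" : String)), ("1", "۱"), ("2", "۲"), ("3", "۳"), ("4", "۴"),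
       ("5", "۵"), ("6", "۶"), ("7", "۷"), ("8", "۸"), ("9", "۹")]).get?
      (String.ofList [digit]) with
      | some p => p
      | none => String.ofList [digit])) = fun digit => [pvFA digit] :=
    funext fun c => by simp only [Function.comp]; rw [pv_itemA]; simp
  rw [hitem]
  have hsingle : ∀ (X : List Char), X.map (fun c => [pvFA c]) = (X.map pvFA).map (fun c => [c]) := by
    intro X; rw [List.map_map]; rfl
  rw [hsingle]
  have hsep : ("" : String).toList = [] := by decide
  rw [hsep, PySem.Chars.join_nil_singletons]
  rw [PySem.Str.toList_replace, show ("," : String).toList = [','] from by decide,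
    show ("،" : String).toList = ['،'] from by decide, pv_replace_single, List.map_map]
  rfl

lemma pv_fmt_repl_dash : pvFA (if '-' = ',' then '،' else '-') = '-' := by decide

-- ===== VERDICT (by name: the statement is the Claim_ definition above) =====
theorem normalize_from_en_spec : Claim_equal_normalize_from_en := by
  intro num _
  unfold Spec_normalize_from_en
  have hlist : (normalize_from_en num).toList = (normalize_from_en_alt num).toList → normalize_from_en num = normalize_from_en_alt num := by
    intro h
    exact String.toList_injective h
  apply hlist
  rw [pv_A_toList]
  simp only [normalize_from_en_alt, String.toList_ofList, PySem.Int.toList_toStr]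
  by_cases hneg : num < 0
  · have hA : PySem.Int.toChars num = '-' :: Nat.toDigits 10 num.natAbs := by
      rw [PySem.Int.toChars, if_pos hneg]
    have hB : PySem.Int.toChars |num| = Nat.toDigits 10 num.natAbs := by
      rw [abs_of_neg hneg, PySem.Int.toChars, if_neg (by omega),
        show (-num).toNat = num.natAbs from by omega]
    simp only [pyFormatComma, hA, hB, List.head?_cons, if_true, List.tail_cons, String.toList_ofList, List.map_cons,
      pv_fmt_repl_dash, if_pos hneg]
    rw [pv_core _ (pv_toDigits_mem num.natAbs)]
    rfl
  · have hA : PySem.Int.toChars num = Nat.toDigits 10 num.toNat := by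
      rw [PySem.Int.toChars, if_neg hneg]
    have hB : PySem.Int.toChars |num| = Nat.toDigits 10 num.toNat := by
      rw [abs_of_nonneg (not_lt.mp hneg), hA]
    have hhd : ¬ (Nat.toDigits 10 num.toNat).head? = some '-' := by
      intro h
      have hmem : '-' ∈ Nat.toDigits 10 num.toNat := by
        cases hds : Nat.toDigits 10 num.toNat with
        | nil => rw [hds] at h; simp at h
        | cons a t =>
          rw [hds] at h
          simp at h
          rw [h]; exact List.mem_cons_self
      have := pv_toDigits_mem num.toNat '-' hmem
      simp [pvDigits] at this
    simp only [pyFormatComma, hA, hB, if_neg hhd, String.toList_ofList, if_neg hneg,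
      List.nil_append]
    rw [pv_core _ (pv_toDigits_mem num.toNat)]
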